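-- pv_equiv track=rewrite | github.com/kzeratal/An-Indoor-Positioning-System-Based-on-Tiles | IPST-Server/loc.py | index_of_biggest
-- ===== SOURCE A (Python) =====
-- def index_of_biggest(array):
--     biggest_index = 0
--     second_biggest_index = -1
--
--     for index in range(0, len(array)):
--         if array[index] > array[biggest_index]:
--             second_biggest_index = biggest_index
--             biggest_index = index
--     return biggest_index, second_biggest_index
-- ===== SOURCE B (Python) =====
-- def index_of_biggest(array):
--     if not array:
--         return 0, -1
--     biggest = array.index(max(array))
--     if biggest == 0:
--         return 0, -1
--     prefix = array[:biggest]
--     return biggest, prefix.index(max(prefix))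
-- ===== Notes on version B (the rewrite author's own statement) =====
-- stated objective: idiomatic
-- what changed: A's single interleaved scan that threads two indices is replaced by builtin-based passes: first index of max(array), then first index of max of the strict prefix before it (which is exactly A's penultimate prefix-maximum record).
import Mathlib
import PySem

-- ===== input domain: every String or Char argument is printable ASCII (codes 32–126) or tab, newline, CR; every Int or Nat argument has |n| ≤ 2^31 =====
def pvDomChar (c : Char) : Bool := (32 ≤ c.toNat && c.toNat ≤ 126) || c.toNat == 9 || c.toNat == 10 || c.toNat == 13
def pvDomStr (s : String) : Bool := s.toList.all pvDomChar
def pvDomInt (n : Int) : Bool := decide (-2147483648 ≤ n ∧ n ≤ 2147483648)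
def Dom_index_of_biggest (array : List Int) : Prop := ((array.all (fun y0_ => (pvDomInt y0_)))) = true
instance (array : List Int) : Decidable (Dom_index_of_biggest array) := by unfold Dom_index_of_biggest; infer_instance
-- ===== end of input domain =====

-- B replaces A's single interleaved record-keeping scan by builtin-style passes:
-- first index of max(array), then first index of max of the prefix before it (objective: idiomatic).

-- ===== PORT A =====
-- single forward scan; array[index]/array[biggest_index] are always in range, so pyGetD's default is never used
def index_of_biggest (array : List Int) : Int × Int :=
  (PySem.List.pyRange 0 (array.length : Int) 1).foldl
    (fun (st : Int × Int) (index : Int) =>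
      if PySem.List.pyGetD array index 0 > PySem.List.pyGetD array st.1 0 then
        (index, st.1)
      else st)
    ((0 : Int), (-1 : Int))

-- ===== PORT B =====
def index_of_biggest_alt (array : List Int) : Int × Int :=
  match PySem.List.max? array (fun x => x) with
  | none => (0, -1)                                  -- empty array
  | some m =>
    let biggest : Int := (((PySem.List.index? array m).getD 0 : Nat) : Int)
    if biggest = 0 then (0, -1)
    else
      let pre := PySem.List.slice array none (some biggest)
      (biggest,
        ((((PySem.List.max? pre (fun x => x)).bind
            (fun m2 => PySem.List.index? pre m2)).getD 0 : Nat) : Int))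

-- ===== PRECONDITION & SPEC =====
def Spec_index_of_biggest (array : List Int) (out : Int × Int) : Prop := out = index_of_biggest_alt array
instance (array : List Int) (out : Int × Int) : Decidable (Spec_index_of_biggest array out) := by unfold Spec_index_of_biggest; infer_instance

-- ===== CLAIM (what is proved, stated in full; the proofs are below) =====
def Claim_equal_index_of_biggest : Prop := ∀ (array : List Int), Dom_index_of_biggest array → Spec_index_of_biggest array (index_of_biggest array)

-- ===== LEMMAS AND PROOFS =====

-- foldl with an invariant: congruence of two step functions that agree on invariant states
theorem pvFoldlCongrInv {α σ : Type} (f g : σ → α → σ) (inv : σ → Prop) (l : List α) (s : σ)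
    (hs : inv s) (h : ∀ t a, a ∈ l → inv t → f t a = g t a ∧ inv (f t a)) :
    l.foldl f s = l.foldl g s := by
  induction l generalizing s with
  | nil => rfl
  | cons a l ih =>
    have ha := h s a (List.mem_cons_self) hs
    simp only [List.foldl_cons, ha.1]
    exact ih (g s a) (ha.1 ▸ ha.2) (fun t b hb => h t b (List.mem_cons_of_mem a hb))

theorem pvFoldlInv {α σ : Type} (f : σ → α → σ) (inv : σ → Prop) (l : List α) (s : σ)
    (hs : inv s) (h : ∀ t a, a ∈ l → inv t → inv (f t a)) :
    inv (l.foldl f s) := by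
  induction l generalizing s with
  | nil => exact hs
  | cons a l ih =>
    exact ih (f s a) (h s a (List.mem_cons_self) hs)
      (fun t b hb => h t b (List.mem_cons_of_mem a hb))

theorem pvA_inv (xs : List Int) :
    0 ≤ (index_of_biggest xs).1 ∧ (index_of_biggest xs).1 < max 1 (xs.length : Int) := by
  unfold index_of_biggest
  apply pvFoldlInv _ (fun st : Int × Int => 0 ≤ st.1 ∧ st.1 < max 1 (xs.length : Int))
  · constructor <;> simp
  · intro t a ha ht
    have := (PySem.List.mem_pyRange_one).1 ha
    split
    · constructor <;> simp <;> omega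
    · exact ht

theorem pvGetD_append_left (xs : List Int) (x : Int) (i : Int) (h0 : 0 ≤ i)
    (h1 : i < (xs.length : Int)) :
    PySem.List.pyGetD (xs ++ [x]) i 0 = PySem.List.pyGetD xs i 0 := by
  obtain ⟨k, rfl⟩ := Int.eq_ofNat_of_zero_le h0
  have hk : k < xs.length := by exact_mod_cast h1
  rw [PySem.List.pyGetD_natCast, PySem.List.pyGetD_natCast]
  simp [List.getD, List.getElem?_append_left hk]

theorem pvA_succ (xs : List Int) (x : Int) :
    index_of_biggest (xs ++ [x]) =
      (if x > PySem.List.pyGetD (xs ++ [x]) (index_of_biggest xs).1 0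
       then ((xs.length : Int), (index_of_biggest xs).1)
       else index_of_biggest xs) := by
  have hinv := pvA_inv xs
  have hlen : ((xs ++ [x]).length : Int) = (xs.length : Int) + 1 := by
    simp
  unfold index_of_biggest
  rw [hlen, PySem.List.pyRange_one_succ_right (by positivity), List.foldl_append]
  have hcongr :
      (PySem.List.pyRange 0 (xs.length : Int) 1).foldl
        (fun (st : Int × Int) (index : Int) =>
          if PySem.List.pyGetD (xs ++ [x]) index 0 > PySem.List.pyGetD (xs ++ [x]) st.1 0 then
            (index, st.1) else st) ((0 : Int), (-1 : Int))
      = (PySem.List.pyRange 0 (xs.length : Int) 1).foldl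
        (fun (st : Int × Int) (index : Int) =>
          if PySem.List.pyGetD xs index 0 > PySem.List.pyGetD xs st.1 0 then
            (index, st.1) else st) ((0 : Int), (-1 : Int)) := by
    apply pvFoldlCongrInv _ _ (fun st : Int × Int => 0 ≤ st.1 ∧ st.1 < max 1 (xs.length : Int))
    · constructor <;> simp
    · intro t a ha ht
      have hmem := (PySem.List.mem_pyRange_one).1 ha
      have hn1 : (1 : Int) ≤ (xs.length : Int) := by omega
      have ht1 : t.1 < (xs.length : Int) := by omega
      rw [pvGetD_append_left xs x a hmem.1 hmem.2, pvGetD_append_left xs x t.1 ht.1 ht1]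
      refine ⟨rfl, ?_⟩
      split
      · constructor <;> simp <;> omega
      · exact ht
  rw [hcongr]
  have hx : PySem.List.pyGetD (xs ++ [x]) (xs.length : Int) 0 = x := by
    rw [PySem.List.pyGetD_natCast]
    simp [List.getD]
  simp only [List.foldl_cons, List.foldl_nil, hx]

-- the first component of B's result is 0 or the stored argmax index
theorem pvAlt_fst (xs : List Int) (m : Int) (k : Nat)
    (hmax : PySem.List.max? xs (fun x => x) = some m)
    (hidx : PySem.List.index? xs m = some k) :
    (index_of_biggest_alt xs).1 = (k : Int) ∧
    (k = 0 → index_of_biggest_alt xs = (0, -1)) := by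
  unfold index_of_biggest_alt
  rw [hmax]
  simp only [hidx, Option.getD_some]
  split
  · rename_i h
    have : k = 0 := by exact_mod_cast h
    subst this
    exact ⟨by simp, fun _ => rfl⟩
  · rename_i h
    have : k ≠ 0 := fun hk => h (by exact_mod_cast hk)
    exact ⟨rfl, fun hk => absurd hk this⟩

theorem pvMain (xs : List Int) : index_of_biggest xs = index_of_biggest_alt xs := by
  induction xs using List.reverseRecOn with
  | nil => rfl
  | append_singleton xs x ih =>
    rw [pvA_succ xs x, ih]
    cases hmax : PySem.List.max? xs (fun x => x) with
    | none =>
      -- xs = []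
      have hnil : xs = [] := (PySem.List.max?_eq_none_iff _ _).1 hmax
      subst hnil
      have h0 : index_of_biggest_alt ([] : List Int) = (0, -1) := rfl
      rw [h0]
      simp only [List.nil_append, PySem.List.pyGetD_zero_cons]
      rw [if_neg (lt_irrefl x)]
      unfold index_of_biggest_alt
      rw [PySem.List.max?_id_cons]
      simp
    | some m =>
      have hmem : m ∈ xs := PySem.List.max?_mem hmax
      have hle : ∀ y ∈ xs, y ≤ m := fun y hy => PySem.List.max?_isMax hmax y hy
      have hsome : (PySem.List.index? xs m).isSome := (PySem.List.index?_isSome_iff _ _).2 hmem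
      obtain ⟨k, hidx⟩ := Option.isSome_iff_exists.1 hsome
      obtain ⟨hk, hxk, -⟩ := PySem.List.getElem_of_index?_eq_some hidx
      obtain ⟨hfst, hzero⟩ := pvAlt_fst xs m k hmax hidx
      -- the compared value is always xs[k] = m
      have hgetk : PySem.List.pyGetD (xs ++ [x]) ((k : Nat) : Int) 0 = m := by
        rw [PySem.List.pyGetD_natCast]
        have hk' : k < (xs ++ [x]).length := by simp; omega
        rw [List.getD_eq_getElem _ _ hk', List.getElem_append_left hk]
        exact hxk
      have hget : PySem.List.pyGetD (xs ++ [x]) (index_of_biggest_alt xs).1 0 = m := by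
        by_cases hk0 : k = 0
        · rw [hzero hk0]
          subst hk0
          rw [show ((0, -1) : Int × Int).1 = ((0 : Nat) : Int) by norm_num]
          exact hgetk
        · rw [hfst]; exact hgetk
      rw [hget]
      by_cases hgt : x > m
      · rw [if_pos hgt]
        -- max of xs ++ [x] is x, first found at index xs.length
        have hnotin : x ∉ xs := fun hx => absurd (hle x hx) (by omega)
        have hmax' : PySem.List.max? (xs ++ [x]) (fun y => y) = some x := by
          cases hm' : PySem.List.max? (xs ++ [x]) (fun y => y) with
          | none =>
            have := (PySem.List.max?_eq_none_iff _ _).1 hm'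
            simp at this
          | some m' =>
            have hm'mem : m' ∈ xs ++ [x] := PySem.List.max?_mem hm'
            have hxle : x ≤ m' := PySem.List.max?_isMax hm' x (by simp)
            rcases List.mem_append.1 hm'mem with h | h
            · exact absurd (hle m' h) (by omega)
            · simp at h; rw [h]
        have hidx' : PySem.List.index? (xs ++ [x]) x = some xs.length :=
          PySem.List.index?_append_singleton_self xs x hnotin
        have hne : ((xs.length : Nat) : Int) ≠ 0 := by
          exact_mod_cast Nat.pos_iff_ne_zero.1 (List.length_pos_iff.2 (List.ne_nil_of_mem hmem))
        have hpre : PySem.List.slice (xs ++ [x]) none (some ((xs.length : Nat) : Int)) = xs := by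
          rw [PySem.List.slice_to_natCast]
          simp
        have halt : index_of_biggest_alt (xs ++ [x]) = ((xs.length : Int), (k : Int)) := by
          unfold index_of_biggest_alt
          rw [hmax']
          simp only [hidx', Option.getD_some]
          rw [if_neg hne, hpre, hmax]
          simp only [Option.bind_some, hidx, Option.getD_some]
        rw [halt, hfst]
      · rw [if_neg hgt]
        have hxlem : x ≤ m := by omega
        -- max of xs ++ [x] is still m, at the same index k
        have hmax' : PySem.List.max? (xs ++ [x]) (fun y => y) = some m := by
          cases hm' : PySem.List.max? (xs ++ [x]) (fun y => y) with
          | none =>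
            have := (PySem.List.max?_eq_none_iff _ _).1 hm'
            simp at this
          | some m' =>
            have hm'mem : m' ∈ xs ++ [x] := PySem.List.max?_mem hm'
            have hmle : m ≤ m' := PySem.List.max?_isMax hm' m (by simp [hmem])
            have hm'le : m' ≤ m := by
              rcases List.mem_append.1 hm'mem with h | h
              · exact hle m' h
              · simp at h; omega
            rw [le_antisymm hm'le hmle]
        have hidx' : PySem.List.index? (xs ++ [x]) m = some k := by
          rw [PySem.List.index?_append_of_mem [x] hmem, hidx]
        by_cases hk0 : k = 0
        · rw [hzero hk0]
          unfold index_of_biggest_alt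
          rw [hmax']
          simp only [hidx', Option.getD_some, hk0]
          rw [if_pos (by norm_num)]
        · have hne : ((k : Nat) : Int) ≠ 0 := by exact_mod_cast hk0
          have hpre : PySem.List.slice (xs ++ [x]) none (some ((k : Nat) : Int)) =
              PySem.List.slice xs none (some ((k : Nat) : Int)) := by
            rw [PySem.List.slice_to_natCast, PySem.List.slice_to_natCast]
            exact List.take_append_of_le_length (Nat.le_of_lt hk)
          unfold index_of_biggest_alt
          rw [hmax', hmax]
          simp only [hidx', hidx, Option.getD_some]
          rw [if_neg hne, if_neg hne, hpre]

-- ===== VERDICT (by name: the statement is the Claim_ definition above) =====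
theorem index_of_biggest_spec : Claim_equal_index_of_biggest := by
  intro array _
  unfold Spec_index_of_biggest
  exact pvMain array
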